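-- pv_equiv track=rewrite | github.com/zero850x-ctrl/da-xiao-ren | archive/old_systems/asus_sn_generator.py | validate_sn
-- ===== SOURCE A (Python) =====
-- from collections import Counter
--
-- def validate_sn(sn):
--     """驗證SN有效性"""
--     # 基本檢查
--     if len(sn) != 15:
--         return False
--
--     if not sn.isalnum():
--         return False
--
--     if sn != sn.upper():
--         return False
--
--     # 檢查是否有連續三個相同字符
--     for i in range(len(sn) - 2):
--         if sn[i] == sn[i+1] == sn[i+2]:
--             return False
--
--     # 檢查字符分布
--     char_count = Counter(sn)
--     if max(char_count.values()) > 4:  # 單字符最多出現4次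
--         return False
--
--     # 檢查數字字母比例
--     digits = sum(1 for c in sn if c.isdigit())
--     letters = sum(1 for c in sn if c.isalpha())
--
--     if digits < 5 or letters < 5:  # 至少5個數字和5個字母
--         return False
--
--     return True
-- ===== SOURCE B (Python) =====
-- def validate_sn(sn):
--     """驗證SN有效性"""
--     if len(sn) != 15:
--         return False
--     if not sn.isalnum():
--         return False
--     if sn != sn.upper():
--         return False
--     # one pass: running counts, digit/letter tallies and the last two characters
--     counts = {}
--     digits = 0
--     letters = 0
--     p2 = p1 = None
--     for c in sn:
--         if p2 == c and p1 == c: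
--             return False          # third identical character in a row
--         n = counts.get(c, 0) + 1
--         if n > 4:
--             return False          # a character would occur 5 times
--         counts[c] = n
--         if c.isdigit():
--             digits += 1
--         if c.isalpha():
--             letters += 1
--         p2, p1 = p1, c
--     return digits >= 5 and letters >= 5
-- ===== Notes on version B (the rewrite author's own statement) =====
-- stated objective: alternative
-- what changed: A's four separate post-guard passes (consecutive-triple index loop, Counter plus max of its values, and two digit/letter comprehensions) are fused into a single loop over the characters that maintains a running counts dict, digit/letter tallies and the two previous characters, returning False as soon as a third repeat or a fifth occurrence appears; the three whole-string guards are kept verbatim.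
import Mathlib
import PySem

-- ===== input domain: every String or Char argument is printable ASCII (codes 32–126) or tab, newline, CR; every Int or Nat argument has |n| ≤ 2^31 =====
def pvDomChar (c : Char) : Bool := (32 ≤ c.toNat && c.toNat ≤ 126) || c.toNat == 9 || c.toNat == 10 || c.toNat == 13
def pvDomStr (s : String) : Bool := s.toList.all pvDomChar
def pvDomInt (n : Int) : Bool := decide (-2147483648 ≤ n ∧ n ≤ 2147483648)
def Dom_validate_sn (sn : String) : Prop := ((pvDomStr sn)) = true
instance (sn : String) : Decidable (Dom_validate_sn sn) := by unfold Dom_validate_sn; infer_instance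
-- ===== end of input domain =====

-- B keeps A's three whole-string guards but fuses A's four later passes (triple scan,
-- Counter + max, digit sum, letter sum) into one loop over the characters ('simpler/alternative':
-- one pass with running state instead of four separate traversals).

-- ===== PORT A =====
-- for i in range(len(sn) - 2): if sn[i] == sn[i+1] == sn[i+2]: return False
def tripleScan (cs : List Char) : List Int → Bool
  | [] => false
  | i :: rest =>
    if (PySem.List.pyGetD cs i ' ' == PySem.List.pyGetD cs (i + 1) ' ') &&
       (PySem.List.pyGetD cs (i + 1) ' ' == PySem.List.pyGetD cs (i + 2) ' ')
    then true
    else tripleScan cs rest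

-- max(char_count.values()) > 4  (the none branch is unreachable: Python's max([]) raises,
-- but this point is only reached with len(sn) == 15)
def maxCountGt4 (d : PySem.Dict Char Int) : Bool :=
  match PySem.List.max? d.values (fun v => v) with
  | some m => m > 4
  | none => false

-- digits = sum(1 for c in sn if c.isdigit())
def countDigits (cs : List Char) : Int :=
  cs.foldl (fun acc c => if PySem.Chars.isdigit c then acc + 1 else acc) 0

-- letters = sum(1 for c in sn if c.isalpha())
def countLetters (cs : List Char) : Int :=
  cs.foldl (fun acc c => if PySem.Chars.isalpha c then acc + 1 else acc) 0

def validate_sn (sn : String) : Bool :=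
  if PySem.Str.len sn ≠ 15 then false
  else if !PySem.Str.strIsalnum sn then false
  else if sn ≠ PySem.Str.upper sn then false
  else
    if tripleScan sn.toList (PySem.List.pyRange 0 (PySem.Str.len sn - 2) 1) then false
    else if maxCountGt4 (PySem.Dict.counter sn.toList) then false
    else if countDigits sn.toList < 5 || countLetters sn.toList < 5 then false
    else true

-- ===== PORT B =====
-- the fused loop of Source B: running counts dict, digit/letter tallies, last two characters
def altLoop : List Char → PySem.Dict Char Int → Int → Int → Option Char → Option Char → Bool
  | [], _, digits, letters, _, _ => decide (digits ≥ 5) && decide (letters ≥ 5)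
  | c :: rest, counts, digits, letters, p2, p1 =>
    if p2 == some c && p1 == some c then false
    else
      let n := counts.getD c 0 + 1
      if n > 4 then false
      else
        altLoop rest (counts.insert c n)
          (if PySem.Chars.isdigit c then digits + 1 else digits)
          (if PySem.Chars.isalpha c then letters + 1 else letters)
          p1 (some c)

def validate_sn_alt (sn : String) : Bool :=
  if PySem.Str.len sn ≠ 15 then false
  else if !PySem.Str.strIsalnum sn then false
  else if sn ≠ PySem.Str.upper sn then false
  else altLoop sn.toList PySem.Dict.empty 0 0 none none

-- ===== PRECONDITION & SPEC =====
def Spec_validate_sn (sn : String) (out : Bool) : Prop := out = validate_sn_alt sn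
instance (sn : String) (out : Bool) : Decidable (Spec_validate_sn sn out) := by unfold Spec_validate_sn; infer_instance

-- ===== CLAIM (what is proved, stated in full; the proofs are below) =====
def Claim_equal_validate_sn : Prop := ∀ (sn : String), Dom_validate_sn sn → Spec_validate_sn sn (validate_sn sn)

-- ===== LEMMAS AND PROOFS =====

-- structural characterisation of the triple check: carries the two previous characters
def noTriple : Option Char → Option Char → List Char → Bool
  | _, _, [] => true
  | p2, p1, c :: rest =>
    if p2 == some c && p1 == some c then false else noTriple p1 (some c) rest

-- window form of the triple check
def hasTri3 : List Char → Bool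
  | a :: b :: c :: t => ((a == b) && (b == c)) || hasTri3 (b :: c :: t)
  | _ => false

-- structural characterisation of the count check
def countsOk : PySem.Dict Char Int → List Char → Bool
  | _, [] => true
  | counts, c :: rest =>
    let n := counts.getD c 0 + 1
    if n > 4 then false else countsOk (counts.insert c n) rest

lemma altLoop_eq (cs : List Char) : ∀ (counts : PySem.Dict Char Int) (d l : Int)
    (p2 p1 : Option Char),
    altLoop cs counts d l p2 p1 =
      (noTriple p2 p1 cs && countsOk counts cs &&
       decide (5 ≤ cs.foldl (fun acc c => if PySem.Chars.isdigit c then acc + 1 else acc) d) &&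
       decide (5 ≤ cs.foldl (fun acc c => if PySem.Chars.isalpha c then acc + 1 else acc) l)) := by
  induction cs with
  | nil => intro counts d l p2 p1; rfl
  | cons c rest ih =>
    intro counts d l p2 p1
    by_cases h1 : (p2 == some c && p1 == some c) = true
    · simp [altLoop, noTriple, h1]
    · by_cases h2 : counts.getD c 0 + 1 > 4
      · simp [altLoop, noTriple, countsOk, h1, h2]
      · simp only [altLoop, noTriple, countsOk, h1, h2, if_false, List.foldl_cons]
        exact ih _ _ _ _ _

lemma noTriple_some (t : List Char) : ∀ (a b : Char),
    noTriple (some a) (some b) t = !hasTri3 (a :: b :: t) := by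
  induction t with
  | nil => intro a b; simp [noTriple, hasTri3]
  | cons c t' ih =>
    intro a b
    by_cases hac : a = c <;> by_cases hbc : b = c <;>
      simp [noTriple, hasTri3, hac, hbc, ih]

lemma noTriple_none (cs : List Char) : noTriple none none cs = !hasTri3 cs := by
  match cs with
  | [] => simp [noTriple, hasTri3]
  | [a] => simp [noTriple, hasTri3]
  | a :: b :: t =>
    have e : noTriple none none (a :: b :: t) = noTriple (some a) (some b) t := rfl
    rw [e, noTriple_some]

lemma hasTri3_short (l : List Char) (h : l.length ≤ 2) : hasTri3 l = false := by
  match l with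
  | [] => rfl
  | [_] => rfl
  | [_, _] => rfl
  | _ :: _ :: _ :: _ => simp at h

lemma tripleScan_eq (n : Nat) : ∀ (cs : List Char) (k : Nat), cs.length - k ≤ n →
    tripleScan cs (PySem.List.pyRange k ((cs.length : Int) - 2) 1) = hasTri3 (cs.drop k) := by
  induction n with
  | zero =>
    intro cs k h
    have hk : cs.length ≤ k := by omega
    rw [PySem.List.pyRange_one_eq_nil (by omega)]
    rw [List.drop_eq_nil_of_le hk]
    rfl
  | succ n ih =>
    intro cs k h
    by_cases hk : (k : Int) < (cs.length : Int) - 2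
    · have hk2 : k + 2 < cs.length := by omega
      have hk1 : k + 1 < cs.length := by omega
      have hk0 : k < cs.length := by omega
      rw [PySem.List.pyRange_one_cons hk]
      have e0 : PySem.List.pyGetD cs (k : Int) ' ' = cs[k] := by
        rw [PySem.List.pyGetD_natCast]; simp [List.getD, hk0]
      have e1 : PySem.List.pyGetD cs ((k : Int) + 1) ' ' = cs[k + 1] := by
        have : (k : Int) + 1 = ((k + 1 : Nat) : Int) := by push_cast; ring
        rw [this, PySem.List.pyGetD_natCast]; simp [List.getD, hk1]
      have e2 : PySem.List.pyGetD cs ((k : Int) + 2) ' ' = cs[k + 2] := by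
        have : (k : Int) + 2 = ((k + 2 : Nat) : Int) := by push_cast; ring
        rw [this, PySem.List.pyGetD_natCast]; simp [List.getD, hk2]
      have hdrop : cs.drop k = cs[k] :: cs[k + 1] :: cs[k + 2] :: cs.drop (k + 3) := by
        rw [List.drop_eq_getElem_cons hk0, List.drop_eq_getElem_cons hk1,
            List.drop_eq_getElem_cons hk2]
      have hrec : (k : Int) + 1 = ((k + 1 : Nat) : Int) := by push_cast; ring
      simp only [tripleScan, e0, e1, e2, hdrop, hasTri3]
      by_cases hc : ((cs[k] == cs[k + 1]) && (cs[k + 1] == cs[k + 2])) = true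
      · simp [hc]
      · simp only [hc, Bool.false_or]
        rw [hrec, ih cs (k + 1) (by omega)]
        rw [List.drop_eq_getElem_cons hk1, List.drop_eq_getElem_cons hk2]
        simp
    · rw [PySem.List.pyRange_one_eq_nil (by omega)]
      rw [hasTri3_short (cs.drop k) (by simp; omega)]
      rfl

lemma countsOk_eq (cs : List Char) : ∀ (pre : List Char) (counts : PySem.Dict Char Int),
    (∀ c, counts.getD c 0 = (pre.count c : Int)) → (∀ c, pre.count c ≤ 4) →
    countsOk counts cs = decide (∀ c, (pre ++ cs).count c ≤ 4) := by
  induction cs with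
  | nil =>
    intro pre counts _ h4
    simp only [countsOk, List.append_nil]
    simp [h4]
  | cons c rest ih =>
    intro pre counts hc h4
    by_cases hbig : counts.getD c 0 + 1 > 4
    · have hcc : 4 < (pre ++ c :: rest).count c := by
        have h1 := hc c
        have he : (pre ++ c :: rest).count c = pre.count c + (rest.count c + 1) := by
          simp [List.count_append, List.count_cons_self]
        omega
      have hnot : ¬ (∀ x, (pre ++ c :: rest).count x ≤ 4) := fun hall =>
        absurd (hall c) (by omega)
      simp only [countsOk, if_pos hbig]
      symm
      simpa using hnot
    · have step : ∀ x, (counts.insert c (counts.getD c 0 + 1)).getD x 0 =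
          ((pre ++ [c]).count x : Int) := by
        intro x
        rw [PySem.Dict.getD_insert]
        by_cases hx : x = c
        · subst hx; simp [List.count_append, hc x]
        · simp [hx, List.count_append, hc x, Ne.symm hx]
      have step4 : ∀ x, (pre ++ [c]).count x ≤ 4 := by
        intro x
        by_cases hx : x = c
        · subst hx
          have := hc x
          simp [List.count_append]
          omega
        · have hcx : ¬ c = x := fun hh => hx hh.symm
          simp [List.count_append, hcx]
          exact h4 x
      simp only [countsOk, hbig, if_false]
      rw [ih (pre ++ [c]) _ step step4]
      simp [List.append_assoc]

lemma maxCountGt4_eq (cs : List Char) (h : cs ≠ []) :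
    maxCountGt4 (PySem.Dict.counter cs) = !decide (∀ c, cs.count c ≤ 4) := by
  have hvals : (PySem.Dict.counter cs).values =
      (PySem.Set.ofList cs).map (fun k => ((cs.count k : Nat) : Int)) := by
    rw [PySem.Dict.values_eq_map_keys _ (PySem.Dict.nodup_keys_counter cs) 0,
        PySem.Dict.keys_counter]
    apply List.map_congr_left
    intro k _
    exact PySem.Dict.getD_counter cs k
  unfold maxCountGt4
  cases hmax : PySem.List.max? (PySem.Dict.counter cs).values (fun v => v) with
  | none =>
    exfalso
    rw [PySem.List.max?_eq_none_iff] at hmax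
    rw [hvals] at hmax
    simp only [List.map_eq_nil_iff] at hmax
    obtain ⟨x, hx⟩ := List.exists_mem_of_ne_nil cs h
    have : x ∈ PySem.Set.ofList cs := (PySem.Set.mem_ofList cs x).mpr hx
    rw [hmax] at this
    simp at this
  | some m =>
    by_cases hall : ∀ c, cs.count c ≤ 4
    · have hm4 : m ≤ 4 := by
        have hmem := PySem.List.max?_mem hmax
        rw [hvals] at hmem
        obtain ⟨c0, _, rfl⟩ := List.mem_map.mp hmem
        exact_mod_cast hall c0
      simp [hall]
      omega
    · obtain ⟨c0, hc0⟩ := not_forall.mp hall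
      have hmemc : c0 ∈ cs := by
        by_contra hnot
        rw [List.count_eq_zero_of_not_mem hnot] at hc0
        omega
      have hin : ((cs.count c0 : Nat) : Int) ∈ (PySem.Dict.counter cs).values := by
        rw [hvals]
        exact List.mem_map.mpr ⟨c0, (PySem.Set.mem_ofList cs c0).mpr hmemc, rfl⟩
      have hle := PySem.List.max?_isMax hmax _ hin
      simp only at hle
      have hm : 4 < m := by
        have h4c : 4 < cs.count c0 := by omega
        have : (4 : Int) < ((cs.count c0 : Nat) : Int) := by exact_mod_cast h4c
        omega
      have hno : ¬∀ c, cs.count c ≤ 4 := fun hA => hc0 (hA c0)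
      simp [hno]
      omega

set_option maxRecDepth 8192 in
lemma core_eq (cs : List Char) (h : cs ≠ []) :
    (if tripleScan cs (PySem.List.pyRange 0 ((cs.length : Int) - 2) 1) then false
     else if maxCountGt4 (PySem.Dict.counter cs) then false
     else if countDigits cs < 5 || countLetters cs < 5 then false
     else true)
    = altLoop cs PySem.Dict.empty 0 0 none none := by
  rw [altLoop_eq]
  rw [noTriple_none]
  have ht := tripleScan_eq cs.length cs 0 (by omega)
  rw [List.drop_zero] at ht
  norm_num at ht
  rw [ht]
  rw [countsOk_eq cs [] PySem.Dict.empty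
      (fun c => by simp [PySem.Dict.getD_empty]) (fun c => by simp)]
  simp only [List.nil_append]
  rw [maxCountGt4_eq cs h]
  unfold countDigits countLetters
  generalize List.foldl (fun acc c => if PySem.Chars.isdigit c then acc + 1 else acc) (0 : Int) cs = D
  generalize List.foldl (fun acc c => if PySem.Chars.isalpha c then acc + 1 else acc) (0 : Int) cs = L
  have key : ∀ x : Int, decide (x < 5) = !decide (5 ≤ x) := by
    intro x
    by_cases h : x < 5
    · rw [decide_eq_true h, decide_eq_false (by omega : ¬ ((5 : Int) ≤ x))]
      rfl
    · rw [decide_eq_false h, decide_eq_true (by omega : (5 : Int) ≤ x)]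
      rfl
  rw [key D, key L]
  by_cases hall : ∀ c : Char, cs.count c ≤ 4 <;>
    cases hT : hasTri3 cs <;>
    cases hD : decide ((5 : Int) ≤ D) <;> cases hL : decide ((5 : Int) ≤ L) <;>
    simp [hall, hT, hD, hL]

-- ===== VERDICT (by name: the statement is the Claim_ definition above) =====
theorem validate_sn_spec : Claim_equal_validate_sn := by
  intro sn _
  unfold Spec_validate_sn validate_sn validate_sn_alt
  by_cases h1 : PySem.Str.len sn ≠ 15
  · rw [if_pos h1, if_pos h1]
  · rw [if_neg h1, if_neg h1]
    by_cases h2 : (!PySem.Str.strIsalnum sn) = true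
    · rw [if_pos h2, if_pos h2]
    · rw [if_neg h2, if_neg h2]
      by_cases h3 : sn ≠ PySem.Str.upper sn
      · rw [if_pos h3, if_pos h3]
      · rw [if_neg h3, if_neg h3]
        have hlen : PySem.Str.len sn = 15 := not_ne_iff.mp h1
        have hlen' : sn.toList.length = 15 := by
          have := PySem.Str.len_eq sn
          omega
        have hne : sn.toList ≠ [] := by
          intro hnil; rw [hnil] at hlen'; simp at hlen'
        have hcast : PySem.Str.len sn - 2 = (sn.toList.length : Int) - 2 := by
          rw [PySem.Str.len_eq]
        rw [hcast]
        exact core_eq sn.toList hne
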